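-- pv_equiv track=rewrite | github.com/simonolander/euler | euler-148.py | count_divs_pow
-- ===== SOURCE A (Python) =====
-- def count_divs_pow(p):
--     if p == 0 or p == 1:
--         return 0
--     else:
--         full_size = 7**(p-1) * (7**(p-1) - 1) // 2
--         fulls = 21 * full_size
--         smalls = 28 * count_divs_pow(p-1)
--         return fulls + smalls
-- ===== SOURCE B (Python) =====
-- def count_divs_pow(p):
--     # closed form of the recurrence: f(p) = (49^p - 2*28^p + 7^p) / 2
--     return (49**p - 2 * 28**p + 7**p) // 2
-- ===== Notes on version B (the rewrite author's own statement) =====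
-- stated objective: faster
-- what changed: Replaced the linear recursion f(p)=21*7^(p-1)(7^(p-1)-1)/2+28*f(p-1) by its closed form (49^p-2*28^p+7^p)//2, computed with fast exponentiation.
import Mathlib
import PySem

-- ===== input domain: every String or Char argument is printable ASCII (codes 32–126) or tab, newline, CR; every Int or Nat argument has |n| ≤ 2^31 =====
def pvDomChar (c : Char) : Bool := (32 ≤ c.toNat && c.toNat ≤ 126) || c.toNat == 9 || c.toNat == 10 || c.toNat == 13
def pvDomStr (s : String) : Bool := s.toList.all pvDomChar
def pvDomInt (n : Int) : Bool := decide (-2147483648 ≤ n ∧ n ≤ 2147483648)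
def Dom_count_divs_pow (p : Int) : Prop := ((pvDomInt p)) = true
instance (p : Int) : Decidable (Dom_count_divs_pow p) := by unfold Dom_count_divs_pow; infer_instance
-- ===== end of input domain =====

-- B replaces A's linear recursion by the closed form (49^p - 2*28^p + 7^p)//2 (faster: O(log p) via fast exponentiation).


-- ===== PORT A =====
-- A's recursion decreases p by 1 down to the base cases 0/1; on the admitted
-- domain 0 ≤ p it is the structural recursion below on p.toNat.
def pvGoA : Nat → Int
  | 0 => 0
  | 1 => 0
  | (n+2) =>
    let full_size := PySem.Int.floordiv ((7:Int)^(n+1) * ((7:Int)^(n+1) - 1)) 2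
    let fulls := 21 * full_size
    let smalls := 28 * pvGoA (n+1)
    fulls + smalls

def count_divs_pow (p : Int) : Int := pvGoA p.toNat

-- ===== PORT B =====
def count_divs_pow_alt (p : Int) : Int :=
  PySem.Int.floordiv ((49:Int)^p.toNat - 2 * (28:Int)^p.toNat + (7:Int)^p.toNat) 2

-- ===== PRECONDITION & SPEC =====
-- Pre_ excludes p < 0, on which A recurses without reaching a base case (RecursionError).
def Pre_count_divs_pow (p : Int) : Prop := 0 ≤ p
instance (p : Int) : Decidable (Pre_count_divs_pow p) := by unfold Pre_count_divs_pow; infer_instance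
def pvWitness_count_divs_pow : Int := 3

def Spec_count_divs_pow (p : Int) (out : Int) : Prop := out = count_divs_pow_alt p
instance (p : Int) (out : Int) : Decidable (Spec_count_divs_pow p out) := by unfold Spec_count_divs_pow; infer_instance

-- ===== CLAIM (what is proved, stated in full; the proofs are below) =====
def Claim_equal_count_divs_pow : Prop := ∀ (p : Int), Dom_count_divs_pow p → Pre_count_divs_pow p → Spec_count_divs_pow p (count_divs_pow p)

-- ===== LEMMAS AND PROOFS =====

theorem pv_two_dvd_sub_one (k : Nat) : (2:Int) ∣ (7:Int)^k - 1 := by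
  have h : (7:Int)^k % 2 = 1 := Int.odd_iff.mp ((Int.odd_iff.mpr (by decide)).pow)
  omega

theorem pv_fd_half {m : Int} (h : (2:Int) ∣ m) :
    2 * PySem.Int.floordiv m 2 = m := by
  rw [PySem.Int.floordiv_eq_ediv_of_pos (by norm_num)]
  exact Int.mul_ediv_cancel' h

theorem pvGoA_closed (n : Nat) :
    2 * pvGoA n = (49:Int)^n - 2 * (28:Int)^n + (7:Int)^n := by
  induction n using Nat.strong_induction_on with
  | _ n ih =>
    match n with
    | 0 => decide
    | 1 => decide
    | (m+2) =>
      have hih := ih (m+1) (by omega)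
      have hfs := pv_fd_half (Dvd.dvd.mul_left (pv_two_dvd_sub_one (m+1)) ((7:Int)^(m+1)))
      show 2 * (21 * PySem.Int.floordiv ((7:Int)^(m+1) * ((7:Int)^(m+1) - 1)) 2
            + 28 * pvGoA (m+1)) = _
      have h49 : (49:Int)^(m+2) = 49 * (49:Int)^(m+1) := by ring
      have h28 : (28:Int)^(m+2) = 28 * (28:Int)^(m+1) := by ring
      have h7 : (7:Int)^(m+2) = 7 * (7:Int)^(m+1) := by ring
      have hsq : (7:Int)^(m+1) * (7:Int)^(m+1) = (49:Int)^(m+1) := by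
        rw [← pow_add, ← two_mul, pow_mul]; norm_num
      have hfs2 : 2 * PySem.Int.floordiv ((7:Int)^(m+1) * ((7:Int)^(m+1) - 1)) 2
          = (49:Int)^(m+1) - (7:Int)^(m+1) := by
        rw [hfs, mul_sub, hsq, mul_one]
      linarith

theorem pv_num_even (n : Nat) :
    (2:Int) ∣ (49:Int)^n - 2 * (28:Int)^n + (7:Int)^n := by
  have h1 : (49:Int)^n % 2 = 1 := Int.odd_iff.mp ((Int.odd_iff.mpr (by decide)).pow)
  have h2 : (7:Int)^n % 2 = 1 := Int.odd_iff.mp ((Int.odd_iff.mpr (by decide)).pow)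
  omega

-- ===== VERDICT (by name: the statement is the Claim_ definition above) =====
theorem count_divs_pow_spec : Claim_equal_count_divs_pow := by
  intro p _ _
  show count_divs_pow p = count_divs_pow_alt p
  unfold count_divs_pow count_divs_pow_alt
  have h := pvGoA_closed p.toNat
  have h2 := pv_fd_half (pv_num_even p.toNat)
  omega
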